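-- pv_equiv track=rewrite | github.com/UnsafePointer/whiteboard.py | solutions/sum_of_min_max_elem_subarr_size_k.py | solution
-- ===== SOURCE A (Python) =====
-- from typing import List, Deque
-- from collections import deque
--
-- def solution(arr: List[int], k: int) -> int:
--     greatest_indices: Deque[int] = deque()  # biggest numbers indices descending
--     smallest_indices: Deque[int] = deque()  # smallest numbers indices descending
--
--     for index in range(k):
--         while len(greatest_indices) > 0 and arr[greatest_indices[0]] < arr[index]:
--             greatest_indices.popleft()
--         while len(smallest_indices) > 0 and arr[smallest_indices[0]] > arr[index]:
--             smallest_indices.popleft()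
--
--         greatest_indices.append(index)
--         smallest_indices.append(index)
--
--     result = 0
--     for index in range(k, len(arr)):
--         maximun = arr[greatest_indices[0]]
--         minimun = arr[smallest_indices[0]]
--         result += maximun + minimun
--
--         while len(greatest_indices) > 0 and arr[greatest_indices[0]] < arr[index]:
--             greatest_indices.popleft()
--         while len(smallest_indices) > 0 and arr[smallest_indices[0]] > arr[index]:
--             smallest_indices.popleft()
--
--         greatest_indices.append(index)
--         smallest_indices.append(index)
--
--     maximun = arr[greatest_indices[0]]
--     minimun = arr[smallest_indices[0]]
--     result += maximun + minimun
--
--     return result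
-- ===== SOURCE B (Python) =====
-- def solution(arr, k):
--     extremes = []  # [running_max, running_min] of the prefix seen so far
--     for j in range(k):  # first window
--         x = arr[j]
--         if not extremes:
--             extremes = [x, x]
--         else:
--             extremes = [max(extremes[0], x), min(extremes[1], x)]
--     total = extremes[0] + extremes[1]
--     for j in range(k, len(arr)):
--         x = arr[j]
--         extremes = [max(extremes[0], x), min(extremes[1], x)]
--         total += extremes[0] + extremes[1]
--     return total
-- ===== Notes on version B (the rewrite author's own statement) =====
-- stated objective: simpler
-- what changed: A's deques never evict by window boundary, so their fronts are just the running prefix max/min; B drops both index deques and the pop loops and keeps one lazily initialised [running_max, running_min] pair, summing it for every window end.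
import Mathlib
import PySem

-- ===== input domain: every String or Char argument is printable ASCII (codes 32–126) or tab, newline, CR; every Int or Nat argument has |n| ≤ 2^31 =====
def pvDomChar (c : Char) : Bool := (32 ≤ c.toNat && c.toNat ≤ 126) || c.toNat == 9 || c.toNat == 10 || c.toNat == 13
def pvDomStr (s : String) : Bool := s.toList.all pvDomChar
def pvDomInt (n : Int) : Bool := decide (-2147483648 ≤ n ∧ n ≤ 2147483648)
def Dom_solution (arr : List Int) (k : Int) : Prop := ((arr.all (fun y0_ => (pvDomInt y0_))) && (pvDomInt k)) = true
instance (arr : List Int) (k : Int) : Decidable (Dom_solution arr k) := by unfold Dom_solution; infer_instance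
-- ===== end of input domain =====

-- B replaces A's two monotonic deques (which are never evicted by a window boundary, so their
-- fronts are just the running prefix max/min) by a single scan with running extremes; same results.

-- ===== PORT A =====
-- A's deques of indices; popleft-while loops become structural recursion on the front.
def popWhileG (arr : List Int) (x : Int) : List Nat → List Nat
  | [] => []
  | i :: rest => if arr.getD i 0 < x then popWhileG arr x rest else i :: rest

def popWhileS (arr : List Int) (x : Int) : List Nat → List Nat
  | [] => []
  | i :: rest => if arr.getD i 0 > x then popWhileS arr x rest else i :: rest

-- one iteration of A's loop body at index i (pop both fronts, append i to both)
def stepA (arr : List Int) (gs : List Nat × List Nat) (i : Nat) : List Nat × List Nat :=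
  (popWhileG arr (arr.getD i 0) gs.1 ++ [i], popWhileS arr (arr.getD i 0) gs.2 ++ [i])

-- second loop: read fronts into result, then same step
def stepA2 (arr : List Int) (st : Int × (List Nat × List Nat)) (i : Nat) : Int × (List Nat × List Nat) :=
  (st.1 + arr.getD (st.2.1.headD 0) 0 + arr.getD (st.2.2.headD 0) 0, stepA arr st.2 i)

def solution (arr : List Int) (k : Int) : Int :=
  -- first loop: for index in range(k)
  let gs0 := (List.range k.toNat).foldl (stepA arr) ([], [])
  -- second loop: for index in range(k, len(arr))
  let st := ((List.range arr.length).drop k.toNat).foldl (stepA2 arr) (0, gs0)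
  -- final read of both fronts
  st.1 + arr.getD (st.2.1.headD 0) 0 + arr.getD (st.2.2.headD 0) 0

-- ===== PORT B =====
-- B keeps [running_max, running_min] in a lazily initialised two-element list
def stepBE (arr : List Int) (e : List Int) (j : Nat) : List Int :=
  let x := arr.getD j 0
  if e.isEmpty then [x, x] else [max (e.getD 0 0) x, min (e.getD 1 0) x]

-- B's second loop: update the extremes, then add them to the total
def stepB2 (arr : List Int) (st : Int × List Int) (j : Nat) : Int × List Int :=
  let e := stepBE arr st.2 j
  (st.1 + e.getD 0 0 + e.getD 1 0, e)

def solution_alt (arr : List Int) (k : Int) : Int :=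
  -- first loop: for j in range(k)
  let e0 := (List.range k.toNat).foldl (stepBE arr) []
  -- total = extremes[0] + extremes[1], then: for j in range(k, len(arr))
  (((List.range arr.length).drop k.toNat).foldl (stepB2 arr)
    (e0.getD 0 0 + e0.getD 1 0, e0)).1

-- ===== PRECONDITION & SPEC =====
-- Pre_ excludes exactly the inputs on which A raises IndexError: k < 1, k > len(arr), or empty arr.
def Pre_solution (arr : List Int) (k : Int) : Prop := 1 ≤ k ∧ k ≤ (arr.length : Int)
instance (arr : List Int) (k : Int) : Decidable (Pre_solution arr k) := by unfold Pre_solution; infer_instance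
def pvWitness_solution : List Int × Int := ([3, 1, 5, 2], 2)

def Spec_solution (arr : List Int) (k : Int) (out : Int) : Prop := out = solution_alt arr k
instance (arr : List Int) (k : Int) (out : Int) : Decidable (Spec_solution arr k out) := by unfold Spec_solution; infer_instance

-- ===== CLAIM (what is proved, stated in full; the proofs are below) =====
def Claim_equal_solution : Prop := ∀ (arr : List Int) (k : Int), Dom_solution arr k → Pre_solution arr k → Spec_solution arr k (solution arr k)

-- ===== LEMMAS AND PROOFS =====

-- prefix max/min of the first m elements (value arr[0] for m = 0; used only with arr ≠ [])
def pmax (arr : List Int) (m : Nat) : Int := (arr.take m).foldl max (arr.headD 0)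
def pmin (arr : List Int) (m : Nat) : Int := (arr.take m).foldl min (arr.headD 0)

-- prefix extremes grow one element at a time
theorem pmax_succ (arr : List Int) (m : Nat) (hm : m < arr.length) :
    pmax arr (m+1) = max (pmax arr m) (arr.getD m 0) := by
  unfold pmax
  rw [List.take_add_one, List.getElem?_eq_getElem hm, List.foldl_append]
  simp [List.getD, List.getElem?_eq_getElem hm]

theorem pmin_succ (arr : List Int) (m : Nat) (hm : m < arr.length) :
    pmin arr (m+1) = min (pmin arr m) (arr.getD m 0) := by
  unfold pmin
  rw [List.take_add_one, List.getElem?_eq_getElem hm, List.foldl_append]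
  simp [List.getD, List.getElem?_eq_getElem hm]

-- sum of pmax t + pmin t for t in [a, a+c)
def sumPM (arr : List Int) : Nat → Nat → Int
  | _, 0 => 0
  | a, c+1 => pmax arr a + pmin arr a + sumPM arr (a+1) c

theorem sumPM_snoc (arr : List Int) (c a : Nat) :
    sumPM arr a (c+1) = sumPM arr a c + (pmax arr (a+c) + pmin arr (a+c)) := by
  induction c generalizing a with
  | zero => simp [sumPM]
  | succ c ih =>
      show pmax arr a + pmin arr a + sumPM arr (a+1) (c+1) = _
      rw [ih]
      show _ = pmax arr a + pmin arr a + sumPM arr (a+1) c + _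
      have : a + 1 + c = a + (c+1) := by omega
      rw [this]; ring

-- deque invariants: nonempty, front value = prefix extreme, all values bounded by it
def invG (arr : List Int) (m : Nat) (g : List Nat) : Prop :=
  g ≠ [] ∧ arr.getD (g.headD 0) 0 = pmax arr m ∧ ∀ i ∈ g, arr.getD i 0 ≤ pmax arr m
def invS (arr : List Int) (m : Nat) (g : List Nat) : Prop :=
  g ≠ [] ∧ arr.getD (g.headD 0) 0 = pmin arr m ∧ ∀ i ∈ g, pmin arr m ≤ arr.getD i 0

theorem popG_all (arr : List Int) (x : Int) (g : List Nat)
    (h : ∀ i ∈ g, arr.getD i 0 < x) : popWhileG arr x g = [] := by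
  induction g with
  | nil => rfl
  | cons i t ih =>
      simp only [popWhileG, if_pos (h i (List.mem_cons_self))]
      exact ih fun j hj => h j (List.mem_cons_of_mem _ hj)

theorem popS_all (arr : List Int) (x : Int) (g : List Nat)
    (h : ∀ i ∈ g, x < arr.getD i 0) : popWhileS arr x g = [] := by
  induction g with
  | nil => rfl
  | cons i t ih =>
      simp only [popWhileS, gt_iff_lt, if_pos (h i (List.mem_cons_self))]
      exact ih fun j hj => h j (List.mem_cons_of_mem _ hj)

theorem stepG_inv (arr : List Int) (m : Nat) (g : List Nat) (hm : m < arr.length)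
    (h : invG arr m g) : invG arr (m+1) (popWhileG arr (arr.getD m 0) g ++ [m]) := by
  obtain ⟨hne, hhead, hall⟩ := h
  set x := arr.getD m 0 with hx
  by_cases hlt : pmax arr m < x
  · have : popWhileG arr x g = [] := popG_all arr x g fun i hi => lt_of_le_of_lt (hall i hi) hlt
    rw [this]
    refine ⟨by simp, ?_, ?_⟩
    · show arr.getD m 0 = pmax arr (m+1)
      rw [pmax_succ arr m hm, ← hx, max_eq_right (le_of_lt hlt)]
    · intro i hi
      have hi' : i = m := by simpa using hi
      rw [hi', pmax_succ arr m hm, ← hx]; exact le_max_right _ _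
  · obtain ⟨h0, t, rfl⟩ := List.exists_cons_of_ne_nil hne
    have hhead' : arr.getD h0 0 = pmax arr m := by
      rw [← hhead, List.headD_cons]
    have hh : ¬ arr.getD h0 0 < x := by rw [hhead']; exact hlt
    simp only [popWhileG, if_neg hh]
    have hpm : pmax arr (m+1) = pmax arr m := by
      rw [pmax_succ arr m hm, ← hx, max_eq_left (le_of_not_gt hlt)]
    refine ⟨by simp, ?_, ?_⟩
    · simpa [hpm] using hhead
    · intro i hi
      rw [hpm]
      rcases List.mem_append.1 hi with hi | hi
      · exact hall i hi
      · simp at hi; subst hi; exact le_of_not_gt hlt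

theorem stepS_inv (arr : List Int) (m : Nat) (g : List Nat) (hm : m < arr.length)
    (h : invS arr m g) : invS arr (m+1) (popWhileS arr (arr.getD m 0) g ++ [m]) := by
  obtain ⟨hne, hhead, hall⟩ := h
  set x := arr.getD m 0 with hx
  by_cases hlt : x < pmin arr m
  · have : popWhileS arr x g = [] := popS_all arr x g fun i hi => lt_of_lt_of_le hlt (hall i hi)
    rw [this]
    refine ⟨by simp, ?_, ?_⟩
    · show arr.getD m 0 = pmin arr (m+1)
      rw [pmin_succ arr m hm, ← hx, min_eq_right (le_of_lt hlt)]
    · intro i hi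
      have hi' : i = m := by simpa using hi
      rw [hi', pmin_succ arr m hm, ← hx]; exact min_le_right _ _
  · obtain ⟨h0, t, rfl⟩ := List.exists_cons_of_ne_nil hne
    have hhead' : arr.getD h0 0 = pmin arr m := by
      rw [← hhead, List.headD_cons]
    have hh : ¬ arr.getD h0 0 > x := by rw [hhead']; exact fun hgt => hlt hgt
    simp only [popWhileS, if_neg hh]
    have hpm : pmin arr (m+1) = pmin arr m := by
      rw [pmin_succ arr m hm, ← hx, min_eq_left (le_of_not_gt hlt)]
    refine ⟨by simp, ?_, ?_⟩
    · simpa [hpm] using hhead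
    · intro i hi
      rw [hpm]
      rcases List.mem_append.1 hi with hi | hi
      · exact hall i hi
      · simp at hi; subst hi; exact le_of_not_gt hlt

-- the deque pair after processing indices 0..m-1
def GSfold (arr : List Int) (m : Nat) : List Nat × List Nat :=
  (List.range m).foldl (stepA arr) ([], [])

theorem GSfold_succ (arr : List Int) (m : Nat) :
    GSfold arr (m+1) = stepA arr (GSfold arr m) m := by
  unfold GSfold; rw [List.range_succ, List.foldl_append]; rfl

theorem GSfold_inv (arr : List Int) (m : Nat) (h1 : 1 ≤ m) (h2 : m ≤ arr.length) :
    invG arr m (GSfold arr m).1 ∧ invS arr m (GSfold arr m).2 := by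
  induction m with
  | zero => omega
  | succ m ih =>
      by_cases hm0 : m = 0
      · subst hm0
        have hlen : 0 < arr.length := by omega
        obtain ⟨a, t, rfl⟩ := List.exists_cons_of_ne_nil (List.ne_nil_of_length_pos hlen)
        constructor
        · exact ⟨by simp [GSfold, stepA, popWhileG], by
            simp [GSfold, stepA, popWhileG, pmax], by
            intro i hi
            simp [GSfold, stepA, popWhileG] at hi
            subst hi; simp [pmax]⟩
        · exact ⟨by simp [GSfold, stepA, popWhileS], by
            simp [GSfold, stepA, popWhileS, pmin], by
            intro i hi
            simp [GSfold, stepA, popWhileS] at hi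
            subst hi; simp [pmin]⟩
      · have hm : m < arr.length := by omega
        obtain ⟨hg, hs⟩ := ih (by omega) (by omega)
        rw [GSfold_succ]
        exact ⟨stepG_inv arr m _ hm hg, stepS_inv arr m _ hm hs⟩

-- the second loop accumulates sumPM and advances the deques
theorem loop2 (arr : List Int) (c : Nat) : ∀ a r, 1 ≤ a → a + c ≤ arr.length →
    (List.range' a c).foldl (stepA2 arr) (r, GSfold arr a)
      = (r + sumPM arr a c, GSfold arr (a + c)) := by
  induction c with
  | zero => intro a r _ _; simp [sumPM]
  | succ c ih =>
      intro a r ha hac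
      rw [List.range'_succ, List.foldl_cons]
      obtain ⟨⟨_, hgh, _⟩, ⟨_, hsh, _⟩⟩ := GSfold_inv arr a ha (by omega)
      have hstep : stepA2 arr (r, GSfold arr a) a
          = (r + pmax arr a + pmin arr a, GSfold arr (a+1)) := by
        simp only [stepA2, GSfold_succ]
        rw [hgh, hsh]
      rw [hstep, ih (a+1) _ (by omega) (by omega)]
      have h1 : a + 1 + c = a + (c + 1) := by omega
      have h2 : r + pmax arr a + pmin arr a + sumPM arr (a+1) c = r + sumPM arr a (c+1) := by
        show _ = r + (pmax arr a + pmin arr a + sumPM arr (a+1) c); ring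
      rw [h1, h2]

theorem drop_range_eq (n m : Nat) (h : m ≤ n) : (List.range n).drop m = List.range' m (n - m) := by
  obtain ⟨c, rfl⟩ : ∃ c, n = m + c := ⟨n - m, by omega⟩
  rw [List.range_eq_range', show m + c - m = c from by omega]
  have h2 : List.range' 0 (m + c) = List.range' 0 m ++ List.range' m c := by
    have := (List.range'_append (s := 0) (m := m) (n := c) (step := 1)).symm
    simpa using this
  rw [h2, List.drop_left' (by simp)]

-- closed form for A
theorem solution_closed (arr : List Int) (k : Int) (h : Pre_solution arr k) :
    solution arr k = sumPM arr k.toNat (arr.length - k.toNat + 1) := by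
  obtain ⟨h1, h2⟩ := h
  have hk1 : 1 ≤ k.toNat := by omega
  have hk2 : k.toNat ≤ arr.length := by omega
  have hsol : solution arr k
      = (((List.range arr.length).drop k.toNat).foldl (stepA2 arr) (0, GSfold arr k.toNat)).1
        + arr.getD ((((List.range arr.length).drop k.toNat).foldl (stepA2 arr)
            (0, GSfold arr k.toNat)).2.1.headD 0) 0
        + arr.getD ((((List.range arr.length).drop k.toNat).foldl (stepA2 arr)
            (0, GSfold arr k.toNat)).2.2.headD 0) 0 := rfl
  rw [hsol, drop_range_eq arr.length k.toNat hk2,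
    loop2 arr (arr.length - k.toNat) k.toNat 0 hk1 (by omega)]
  have hn : k.toNat + (arr.length - k.toNat) = arr.length := by omega
  rw [hn]
  obtain ⟨⟨_, hgh, _⟩, ⟨_, hsh, _⟩⟩ := GSfold_inv arr arr.length (by omega) le_rfl
  have hs := sumPM_snoc arr (arr.length - k.toNat) k.toNat
  rw [hn] at hs
  rw [hgh, hsh, hs]
  ring

-- B's extremes list after the first m indices
def Efold (arr : List Int) (m : Nat) : List Int :=
  (List.range m).foldl (stepBE arr) []

theorem Efold_succ (arr : List Int) (m : Nat) :
    Efold arr (m+1) = stepBE arr (Efold arr m) m := by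
  unfold Efold; rw [List.range_succ, List.foldl_append]; rfl

theorem Efold_inv (arr : List Int) (m : Nat) (h1 : 1 ≤ m) (h2 : m ≤ arr.length) :
    Efold arr m = [pmax arr m, pmin arr m] := by
  induction m with
  | zero => omega
  | succ m ih =>
      rw [Efold_succ]
      by_cases hm0 : m = 0
      · subst hm0
        obtain ⟨a, t, rfl⟩ := List.exists_cons_of_ne_nil
          (List.ne_nil_of_length_pos (by omega : 0 < arr.length))
        simp [Efold, stepBE, pmax, pmin]
      · rw [ih (by omega) (by omega)]
        simp only [stepBE, List.isEmpty_cons, List.getD]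
        rw [pmax_succ arr m (by omega), pmin_succ arr m (by omega)]
        simp [List.getD]

theorem loop2B (arr : List Int) (c : Nat) : ∀ a r, 1 ≤ a → a + c ≤ arr.length →
    (List.range' a c).foldl (stepB2 arr) (r, Efold arr a)
      = (r + sumPM arr (a+1) c, Efold arr (a + c)) := by
  induction c with
  | zero => intro a r _ _; simp [sumPM]
  | succ c ih =>
      intro a r ha hac
      rw [List.range'_succ, List.foldl_cons]
      have hstep : stepB2 arr (r, Efold arr a) a
          = (r + pmax arr (a+1) + pmin arr (a+1), Efold arr (a+1)) := by
        simp only [stepB2, ← Efold_succ]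
        rw [Efold_inv arr (a+1) (by omega) (by omega)]
        simp [List.getD]
      rw [hstep, ih (a+1) _ (by omega) (by omega)]
      have h1 : a + 1 + c = a + (c + 1) := by omega
      have h2 : r + pmax arr (a+1) + pmin arr (a+1) + sumPM arr (a+1+1) c
          = r + sumPM arr (a+1) (c+1) := by
        show _ = r + (pmax arr (a+1) + pmin arr (a+1) + sumPM arr (a+1+1) c); ring
      rw [h1, h2]

-- closed form for B
theorem solution_alt_closed (arr : List Int) (k : Int) (h : Pre_solution arr k) :
    solution_alt arr k = sumPM arr k.toNat (arr.length - k.toNat + 1) := by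
  obtain ⟨h1, h2⟩ := h
  have hk1 : 1 ≤ k.toNat := by omega
  have hk2 : k.toNat ≤ arr.length := by omega
  have hsol : solution_alt arr k
      = (((List.range arr.length).drop k.toNat).foldl (stepB2 arr)
          ((Efold arr k.toNat).getD 0 0 + (Efold arr k.toNat).getD 1 0, Efold arr k.toNat)).1 := rfl
  rw [hsol, drop_range_eq arr.length k.toNat hk2,
    loop2B arr (arr.length - k.toNat) k.toNat _ hk1 (by omega)]
  rw [Efold_inv arr k.toNat hk1 hk2]
  have hc : arr.length - k.toNat + 1 = (arr.length - k.toNat) + 1 := rfl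
  rw [hc, show sumPM arr k.toNat ((arr.length - k.toNat) + 1)
      = pmax arr k.toNat + pmin arr k.toNat + sumPM arr (k.toNat+1) (arr.length - k.toNat)
      from rfl]
  simp [List.getD]

-- ===== VERDICT (by name: the statement is the Claim_ definition above) =====
theorem solution_spec : Claim_equal_solution := by
  intro arr k _ hpre
  unfold Spec_solution
  rw [solution_closed arr k hpre, solution_alt_closed arr k hpre]
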